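-- pv_equiv track=rewrite | github.com/Em-Maclean/Advent-of-code-2022 | 6.py | partone
-- ===== SOURCE A (Python) =====
-- def partone(f):
--
--     count = 0
--     found = False
--
--     while not found:
--
--         found = True
--
--         l = [f[count], f[count+1], f[count+2], f[count+3]]
--         l = sorted(l)
--         for i in range (len(l)-1):
--             if l[i] == l[i+1]:
--                 found = False
--
--         count += 1
--
--     return count + 3
-- ===== SOURCE B (Python) =====
-- def partone(f):
--     for i in range(len(f) - 3):
--         if len(set(f[i:i+4])) == 4:
--             return i + 4
-- ===== Notes on version B (the rewrite author's own statement) =====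
-- stated objective: idiomatic
-- what changed: Replaces A's while-loop with a mutable found flag and a sort-then-adjacent-compare distinctness test by a for/early-return scan over window starts that tests distinctness via set cardinality of the 4-char slice; Pre_ excludes inputs with no 4-distinct window, on which A raises IndexError (B returns None there).
import Mathlib
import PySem

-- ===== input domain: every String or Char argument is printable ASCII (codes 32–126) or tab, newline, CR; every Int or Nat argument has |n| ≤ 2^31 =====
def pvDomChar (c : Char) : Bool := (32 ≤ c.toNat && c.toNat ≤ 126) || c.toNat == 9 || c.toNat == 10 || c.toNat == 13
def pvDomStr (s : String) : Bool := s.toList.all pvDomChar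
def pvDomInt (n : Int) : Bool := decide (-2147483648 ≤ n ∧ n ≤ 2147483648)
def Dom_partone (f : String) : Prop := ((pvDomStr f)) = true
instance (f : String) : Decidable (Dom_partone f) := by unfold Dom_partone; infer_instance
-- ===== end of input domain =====

-- B replaces A's while-loop with a mutable found flag and its sort-then-adjacent-compare
-- distinctness test by a for/early-return scan using set cardinality (objective: idiomatic).

-- ===== PORT A =====
-- A's inner 'for i in range(len(l)-1): if l[i] == l[i+1]: found = False', starting from found = True
def paFound (l : List Char) : Bool :=
  (PySem.List.pyRange 0 ((l.length : Int) - 1) 1).foldl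
    (fun fnd i => if PySem.List.pyGet? l i == PySem.List.pyGet? l (i + 1) then false else fnd) true

-- A's while-loop; fuel bounds the remaining iterations (enough is supplied below); the
-- fall-through 0 marks exactly where the Python raises IndexError — excluded by Pre_partone
def paLoop (cs : List Char) (count : Nat) : Nat → Int
  | 0 => 0
  | fuel + 1 =>
    match PySem.List.pyGet? cs (count : Int), PySem.List.pyGet? cs ((count : Int) + 1),
          PySem.List.pyGet? cs ((count : Int) + 2), PySem.List.pyGet? cs ((count : Int) + 3) with
    | some c0, some c1, some c2, some c3 =>
        if paFound (PySem.List.sorted [c0, c1, c2, c3] (fun x => x) false)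
        then ((count : Int) + 1) + 3
        else paLoop cs (count + 1) fuel
    | _, _, _, _ => 0

def partone (f : String) : Int := paLoop f.toList 0 (f.toList.length + 1)

-- ===== PORT B =====
-- B's 'for i in range(len(f) - 3)'; [] = loop exhausted (Python B returns None; excluded by Pre_partone)
def pbLoop (cs : List Char) : List Int → Int
  | [] => 0
  | i :: rest =>
    if (PySem.Set.ofList (PySem.List.slice cs (some i) (some (i + 4)))).length == 4
    then i + 4 else pbLoop cs rest

def partone_alt (f : String) : Int :=
  pbLoop f.toList (PySem.List.pyRange 0 ((f.toList.length : Int) - 3) 1)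

-- ===== PRECONDITION & SPEC =====
-- Pre_ excludes exactly the inputs with no window of 4 pairwise-distinct consecutive chars:
-- there A runs off the end of the string and raises IndexError (and B returns None).
def Pre_partone (f : String) : Prop :=
  ∃ i < f.toList.length, i + 3 < f.toList.length ∧ ((f.toList.drop i).take 4).Nodup
instance (f : String) : Decidable (Pre_partone f) := by unfold Pre_partone; infer_instance
def pvWitness_partone : String := "abcd"

def Spec_partone (f : String) (out : Int) : Prop := out = partone_alt f
instance (f : String) (out : Int) : Decidable (Spec_partone f out) := by unfold Spec_partone; infer_instance

-- ===== CLAIM (what is proved, stated in full; the proofs are below) =====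
def Claim_equal_partone : Prop := ∀ (f : String), Dom_partone f → Pre_partone f → Spec_partone f (partone f)

-- ===== LEMMAS AND PROOFS =====

theorem discard_sublist (s : List Char) (x : Char) : List.Sublist (PySem.Set.discard s x) s := by
  unfold PySem.Set.discard; exact List.filter_sublist

theorem ofList_sublist (xs : List Char) : List.Sublist (PySem.Set.ofList xs) xs := by
  induction xs with
  | nil => simp [PySem.Set.ofList_nil]
  | cons x t ih =>
    rw [PySem.Set.ofList_cons]
    exact List.Sublist.cons₂ x ((discard_sublist _ _).trans ih)

-- B's test: the set of a 4-element window has 4 elements iff the window has no duplicate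
theorem set_len_iff (w : List Char) (hw : w.length = 4) :
    ((PySem.Set.ofList w).length == 4) = true ↔ w.Nodup := by
  constructor
  · intro h
    have h4 : (PySem.Set.ofList w).length = w.length := by
      rw [hw]; exact beq_iff_eq.mp h
    rw [← List.Sublist.eq_of_length (ofList_sublist w) h4]
    exact PySem.Set.nodup_ofList w
  · intro h
    simp [PySem.Set.ofList_eq_self_of_nodup w h, hw]

theorem paFound_four (w x y z : Char) :
    paFound [w, x, y, z] = true ↔ (w ≠ x ∧ x ≠ y ∧ y ≠ z) := by
  have hr : PySem.List.pyRange (0:Int) 3 1 = [0, 1, 2] := by decide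
  unfold paFound
  norm_num [hr, List.foldl, PySem.List.pyGet?, PySem.List.pyIdx?, beq_iff_eq]
  norm_num [show (2:Int).toNat = 2 from rfl, show (3:Int).toNat = 3 from rfl]
  tauto

theorem nodup_sorted4 (w x y z : Char)
    (hp : ([w,x,y,z] : List Char).Pairwise (fun p q => p ≤ q)) :
    (w ≠ x ∧ x ≠ y ∧ y ≠ z) ↔ ([w,x,y,z] : List Char).Nodup := by
  simp only [List.pairwise_cons] at hp
  have hwx : w ≤ x := hp.1 x (by simp)
  have hxy : x ≤ y := hp.2.1 y (by simp)
  have hyz : y ≤ z := hp.2.2.1 z (by simp)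
  constructor
  · rintro ⟨n1, n2, n3⟩
    have l1 : w < x := lt_of_le_of_ne hwx n1
    have l2 : x < y := lt_of_le_of_ne hxy n2
    have l3 : y < z := lt_of_le_of_ne hyz n3
    simp only [List.nodup_cons, List.mem_cons, List.not_mem_nil, or_false, List.nodup_nil, not_or]
    exact ⟨⟨l1.ne, (l1.trans l2).ne, ((l1.trans l2).trans l3).ne⟩,
           ⟨l2.ne, (l2.trans l3).ne⟩, l3.ne, not_false, trivial⟩
  · intro hnd
    simp only [List.nodup_cons, List.mem_cons, List.not_mem_nil, or_false, not_or] at hnd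
    exact ⟨hnd.1.1, hnd.2.1.1, hnd.2.2.1⟩

-- A's test: sorted window has no equal neighbours iff the window has no duplicate
theorem paFound_iff (a b c d : Char) :
    paFound (PySem.List.sorted [a, b, c, d] (fun v => v) false) = true ↔ ([a, b, c, d] : List Char).Nodup := by
  obtain ⟨w, x, y, z, he⟩ := List.length_eq_four.mp
    (by rw [PySem.List.length_sorted]; rfl : (PySem.List.sorted [a, b, c, d] (fun v => v) false).length = 4)
  have hp : ([w,x,y,z] : List Char).Pairwise (fun p q => p ≤ q) := by
    have := PySem.List.sorted_pairwise ([a,b,c,d] : List Char) (fun v => v)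
    rwa [he] at this
  have hperm : ([w,x,y,z] : List Char).Perm [a,b,c,d] := by
    have := PySem.List.sorted_perm ([a,b,c,d] : List Char) (fun v => v) false
    rwa [he] at this
  rw [he, paFound_four, ← hperm.nodup_iff]
  exact nodup_sorted4 w x y z hp

-- B's slice window written as the four indexed chars A reads
theorem window_eq (cs : List Char) (c : Nat) (hc : c + 3 < cs.length) :
    PySem.List.slice cs (some (c : Int)) (some ((c : Int) + 4)) =
      [cs[c], cs[c+1], cs[c+2], cs[c+3]] := by
  rw [show ((c : Int) + 4) = ((c : Int) + ((4 : Nat) : Int)) by norm_num,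
      PySem.List.slice_natCast_add]
  rw [List.drop_eq_getElem_cons (by omega : c < cs.length), List.take_succ_cons,
      List.drop_eq_getElem_cons (by omega : c + 1 < cs.length), List.take_succ_cons,
      List.drop_eq_getElem_cons (by omega : c + 2 < cs.length), List.take_succ_cons,
      List.drop_eq_getElem_cons (by omega : c + 3 < cs.length), List.take_succ_cons,
      List.take_zero]

theorem partone_loops_eq (cs : List Char) (fuel : Nat) : ∀ c : Nat, cs.length ≤ c + fuel →
    paLoop cs c fuel = pbLoop cs (PySem.List.pyRange (c : Int) ((cs.length : Int) - 3) 1) := by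
  induction fuel with
  | zero =>
    intro c h
    rw [PySem.List.pyRange_one_eq_nil (by omega)]
    rfl
  | succ fuel ih =>
    intro c h
    by_cases hc : c + 3 < cs.length
    · have e0 : PySem.List.pyGet? cs (c : Int) = some cs[c] := by
        rw [PySem.List.pyGet?_natCast]; exact List.getElem?_eq_getElem (by omega)
      have e1 : PySem.List.pyGet? cs ((c : Int) + 1) = some cs[c+1] := by
        rw [show ((c : Int) + 1) = (((c+1 : Nat)) : Int) by push_cast; ring, PySem.List.pyGet?_natCast]
        exact List.getElem?_eq_getElem (by omega)
      have e2 : PySem.List.pyGet? cs ((c : Int) + 2) = some cs[c+2] := by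
        rw [show ((c : Int) + 2) = (((c+2 : Nat)) : Int) by push_cast; ring, PySem.List.pyGet?_natCast]
        exact List.getElem?_eq_getElem (by omega)
      have e3 : PySem.List.pyGet? cs ((c : Int) + 3) = some cs[c+3] := by
        rw [show ((c : Int) + 3) = (((c+3 : Nat)) : Int) by push_cast; ring, PySem.List.pyGet?_natCast]
        exact List.getElem?_eq_getElem (by omega)
      rw [PySem.List.pyRange_one_cons (by omega)]
      unfold paLoop pbLoop
      rw [e0, e1, e2, e3, window_eq cs c hc]
      simp only []
      by_cases hnd : ([cs[c], cs[c+1], cs[c+2], cs[c+3]] : List Char).Nodup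
      · rw [if_pos ((paFound_iff _ _ _ _).mpr hnd), if_pos ((set_len_iff _ rfl).mpr hnd)]
        ring
      · rw [if_neg (fun hx => hnd ((paFound_iff _ _ _ _).mp hx)),
            if_neg (fun hx => hnd ((set_len_iff _ rfl).mp hx))]
        rw [show ((c : Int) + 1) = (((c+1 : Nat)) : Int) by push_cast; ring]
        exact ih (c+1) (by omega)
    · have e3 : PySem.List.pyGet? cs ((c : Int) + 3) = none := by
        rw [show ((c : Int) + 3) = (((c+3 : Nat)) : Int) by push_cast; ring, PySem.List.pyGet?_natCast]
        exact List.getElem?_eq_none (by omega)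
      rw [PySem.List.pyRange_one_eq_nil (by omega)]
      unfold paLoop
      cases h0 : PySem.List.pyGet? cs (c : Int) with
      | none => simp [pbLoop]
      | some a =>
        cases h1 : PySem.List.pyGet? cs ((c : Int) + 1) with
        | none => simp [pbLoop]
        | some b =>
          cases h2 : PySem.List.pyGet? cs ((c : Int) + 2) with
          | none => simp [pbLoop]
          | some d => simp [e3, pbLoop]

-- ===== VERDICT (by name: the statement is the Claim_ definition above) =====
theorem partone_spec : Claim_equal_partone := by
  intro f _ _
  unfold Spec_partone partone partone_alt
  exact partone_loops_eq f.toList (f.toList.length + 1) 0 (by omega)
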